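-- pv_equiv track=rewrite | github.com/robbassett/Project_Euler | python/twelfth_10.py | euler115
-- ===== SOURCE A (Python) =====
-- def euler115(m=3):
--     cache = {}
--     def F(N,n):
--         out=1
--         if n > N:
--             return out
--         if N in cache.keys():
--             return cache[N]
--         for s in range(N-n+1):
--             for b in range(n,N-s+1):
--                 out += F(N-s-b-1,n)
--
--         cache[N] = out
--         return out
--
--     N = 15
--     while True:
--         cv = F(N,m)
--         if cv > 1e6:
--             break
--         N+=1
--     return N
-- ===== SOURCE B (Python) =====
-- def euler115(m=3):
--     # O(N) DP over the linear recurrence f[i] = f[i-1] + 1 + prefix[i-m-1], with a running prefix sum.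
--     fs = []      # fs[i] = number of block arrangements for a row of length i
--     prefix = 0   # sum(fs[0 : i-m]) maintained incrementally
--     prev = 1     # arrangements for length i-1 (1 for the empty row)
--     i = 0
--     while True:
--         v = 1 if i < m else prev + 1 + prefix
--         fs.append(v)
--         if i >= m:
--             prefix += fs[i - m]
--         if i >= 15 and v > 1e6:
--             return i
--         prev = v
--         i += 1
-- ===== Notes on version B (the rewrite author's own statement) =====
-- stated objective: faster
-- what changed: A counts arrangements with a memoized recursion whose body is a double loop over leading gap and block length; B collapses that double sum into the linear recurrence f[i] = f[i-1] + 1 + prefix[i-m-1] and evaluates it bottom-up with a running prefix sum, constant work per row length.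
import Mathlib
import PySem

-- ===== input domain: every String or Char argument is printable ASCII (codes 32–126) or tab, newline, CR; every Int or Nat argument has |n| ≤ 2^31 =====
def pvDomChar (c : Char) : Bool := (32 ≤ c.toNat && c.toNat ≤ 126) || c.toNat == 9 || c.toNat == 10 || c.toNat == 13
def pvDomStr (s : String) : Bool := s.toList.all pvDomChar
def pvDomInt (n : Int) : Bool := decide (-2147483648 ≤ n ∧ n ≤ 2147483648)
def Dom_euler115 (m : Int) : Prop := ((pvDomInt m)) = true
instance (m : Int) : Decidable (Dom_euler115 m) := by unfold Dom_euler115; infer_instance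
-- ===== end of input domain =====

-- B replaces A's memoized triple-nested recursion with a one-pass DP using a running prefix
-- sum over the linear recurrence f[i] = f[i-1] + 1 + prefix[i-m-1]; return values agree on every m ≥ 0.
-- The Nat fuel in both ports is only a totality device; it is proved never to run out on m ≥ 0.

-- ===== PORT A =====
-- A's inner recursive F(N, n) with the memo dict threaded through; fuel bounds the
-- recursion depth (Python's call stack); fuel (N+2).toNat is proved sufficient for n ≥ 0.
def euler115F (fuel : Nat) (n N : Int) (cache : PySem.Dict Int Int) :
    Int × PySem.Dict Int Int :=
  match fuel with
  | 0 => (1, cache)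
  | f + 1 =>
    if n > N then (1, cache)
    else if (cache.get? N).isSome then ((cache.get? N).getD 0, cache)
    else
        let r := (PySem.List.pyRange 0 (N - n + 1) 1).foldl
          (fun acc s =>
            (PySem.List.pyRange n (N - s + 1) 1).foldl
              (fun acc2 b =>
                (acc2.1 + (euler115F f n (N - s - b - 1) acc2.2).1,
                 (euler115F f n (N - s - b - 1) acc2.2).2))
              acc)
          (1, cache)
        (r.1, r.2.insert N r.1)

-- A's 'while True' search loop, N = 15, 16, …, cache persisting across iterations.
def euler115Loop (fuel : Nat) (m N : Int) (cache : PySem.Dict Int Int) : Int :=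
  match fuel with
  | 0 => N
  | f + 1 =>
    let r := euler115F (N + 2).toNat m N cache
    if r.1 > 1000000 then N else euler115Loop f m (N + 1) r.2

def euler115 (m : Int) : Int :=
  euler115Loop ((m + 1000001).toNat + 20) m 15 PySem.Dict.empty

-- ===== PORT B =====
-- B's while loop: i, the table fs, the running prefix sum and the previous value.
def euler115AltLoop (fuel : Nat) (m i : Int) (fs : List Int) (pre prev : Int) : Int :=
  match fuel with
  | 0 => i
  | f + 1 =>
    let v : Int := if i < m then 1 else prev + 1 + pre
    let fs' := fs ++ [v]
    let pre' := if m ≤ i then pre + PySem.List.pyGetD fs' (i - m) 0 else pre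
    if 15 ≤ i ∧ 1000000 < v then i else euler115AltLoop f m (i + 1) fs' pre' v

def euler115_alt (m : Int) : Int :=
  euler115AltLoop (m + 1000020).toNat m 0 [] 0 1

-- ===== PRECONDITION & SPEC =====
-- Pre_ excludes m < 0, where Python A blows the recursion stack (RecursionError) and B
-- raises IndexError: neither program returns there.
def Pre_euler115 (m : Int) : Prop := 0 ≤ m
instance (m : Int) : Decidable (Pre_euler115 m) := by unfold Pre_euler115; infer_instance
def pvWitness_euler115 : Int := 3

def Spec_euler115 (m : Int) (out : Int) : Prop := out = euler115_alt m
instance (m : Int) (out : Int) : Decidable (Spec_euler115 m out) := by unfold Spec_euler115; infer_instance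

-- ===== CLAIM (what is proved, stated in full; the proofs are below) =====
def Claim_equal_euler115 : Prop := ∀ (m : Int), Dom_euler115 m → Pre_euler115 m → Spec_euler115 m (euler115 m)

-- ===== LEMMAS AND PROOFS =====

-- The mathematical arrangement-count: g n k = number of ways to fill a row of length k
-- (blocks of length ≥ n), via B's recurrence.  Both ports are proved to compute g.
def g (n : Nat) (k : Nat) : Int :=
  if k < n then 1
  else (if h : k = 0 then 1 else g n (k - 1)) + 1 +
    ∑ j ∈ (Finset.range (k - n)).attach, g n j.1
termination_by k
decreasing_by
  · omega
  · have hj := j.2; rw [Finset.mem_range] at hj; omega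

-- g over Int arguments (value 1 below n, in particular on all negatives)
def gI (n N : Int) : Int := if N < n then 1 else g n.toNat N.toNat

lemma gI_cast (n : Int) (hn : 0 ≤ n) (k : Nat) : gI n (k : Int) = g n.toNat k := by
  unfold gI
  split
  · rw [g]; rw [if_pos (by omega)]
  · simp

lemma gI_neg (n N : Int) (h : N < n) : gI n N = 1 := by
  unfold gI; rw [if_pos h]

lemma g_pos (n : Nat) : ∀ k : Nat, 1 ≤ g n k := by
  intro k
  induction k using Nat.strong_induction_on with
  | _ k ih =>
    rw [g]
    split
    · omega
    · have h1 : (1:Int) ≤ (if h : k = 0 then 1 else g n (k - 1)) := by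
        split
        · omega
        · exact ih _ (by omega)
      have h2 : (0:Int) ≤ ∑ j ∈ (Finset.range (k - n)).attach, g n j.1 := by
        apply Finset.sum_nonneg
        intro j _
        have hj := j.2; rw [Finset.mem_range] at hj
        have := ih j.1 (by omega)
        omega
      omega

lemma gI_pos (n N : Int) : 1 ≤ gI n N := by
  unfold gI; split
  · omega
  · exact g_pos _ _

-- B's recurrence, in Int form
lemma gI_rec (n N : Int) (hn : 0 ≤ n) (hN : n ≤ N) :
    gI n N = gI n (N - 1) + 1 + ∑ k ∈ Finset.range (N - n).toNat, gI n (k : Int) := by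
  have h0N : 0 ≤ N := le_trans hn hN
  have hNt : gI n N = g n.toNat N.toNat := by
    unfold gI; rw [if_neg (by omega)]
  rw [hNt, g]
  rw [if_neg (by omega)]
  rw [Finset.sum_attach (Finset.range (N.toNat - n.toNat)) (g n.toNat)]
  have hrange : (N - n).toNat = N.toNat - n.toNat := by omega
  rw [hrange]
  have hsum : ∑ k ∈ Finset.range (N.toNat - n.toNat), gI n (k : Int)
      = ∑ k ∈ Finset.range (N.toNat - n.toNat), g n.toNat k := by
    apply Finset.sum_congr rfl
    intro k _
    exact gI_cast n hn k
  rw [hsum]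
  congr 1
  congr 1
  -- prev term
  split
  · -- N.toNat = 0 → N = 0, n = 0, N - 1 = -1 < n
    rw [gI, if_pos (by omega)]
  · -- g n.toNat (N.toNat - 1) = gI n (N - 1)
    by_cases hc : N - 1 < n
    · -- N = n (since n ≤ N), so N.toNat - 1 < n.toNat
      rw [gI, if_pos hc, g, if_pos (by omega)]
    · rw [gI, if_neg hc]
      congr 1
      omega

lemma gI_lb (n : Int) (hn : 0 ≤ n) : ∀ t : Nat, (t : Int) + 1 ≤ gI n (n + t) := by
  intro t
  induction t with
  | zero => simpa using gI_pos n (n + 0)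
  | succ u ih =>
    have hrec := gI_rec n (n + (u + 1 : Nat)) hn (by push_cast; omega)
    have hsum : (0:Int) ≤ ∑ k ∈ Finset.range ((n + (u+1:Nat) - n)).toNat, gI n (k : Int) := by
      apply Finset.sum_nonneg
      intro k _
      have := gI_pos n (k : Int)
      omega
    have heq : (n + (u + 1 : Nat) - 1) = n + (u : Nat) := by push_cast; omega
    rw [heq] at hrec
    push_cast at hrec hsum ih ⊢
    omega

lemma gI_big (m N : Int) (hm : 0 ≤ m) (hN : m + 1000000 ≤ N) : 1000000 < gI m N := by
  have h := gI_lb m hm (N - m).toNat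
  have h2 : (m + ((N - m).toNat : Int)) = N := by omega
  rw [h2] at h
  omega

-- list-range sums are Finset.range sums
lemma sum_map_range (f : ℕ → ℤ) (n : ℕ) :
    ((List.range n).map f).sum = ∑ i ∈ Finset.range n, f i := by
  induction n with
  | zero => simp
  | succ k ih => rw [List.range_succ, Finset.sum_range_succ]; simp [ih]

-- one inner row of A's double sum, reversed into a prefix sum
lemma inner_row (n : Int) (hn : 0 ≤ n) (u : Nat) :
    ∑ j ∈ Finset.range (u + 1), gI n ((u : Int) - j - 1)
      = 1 + ∑ k ∈ Finset.range u, gI n (k : Int) := by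
  have h1 : ∑ j ∈ Finset.range (u + 1), gI n ((u : Int) - j - 1)
      = ∑ j ∈ Finset.range (u + 1), (fun j : ℕ => gI n ((j : Int) - 1)) (u + 1 - 1 - j) := by
    apply Finset.sum_congr rfl
    intro j hj
    rw [Finset.mem_range] at hj
    have : ((u + 1 - 1 - j : ℕ) : Int) = (u : Int) - j := by omega
    simp only [this]
  rw [h1, Finset.sum_range_reflect (fun j : ℕ => gI n ((j : Int) - 1)) (u + 1)]
  rw [Finset.sum_range_succ' (fun j : ℕ => gI n ((j : Int) - 1)) u]
  have h0 : gI n ((0 : ℕ) - 1 : Int) = 1 := by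
    apply gI_neg
    simp; omega
  have h2 : ∀ i : ℕ, gI n (((i + 1 : ℕ) : Int) - 1) = gI n (i : Int) := by
    intro i; congr 1; push_cast; ring
  calc (∑ i ∈ Finset.range u, gI n (((i + 1 : ℕ) : Int) - 1)) + gI n ((0 : ℕ) - 1 : Int)
      = (∑ i ∈ Finset.range u, gI n (i : Int)) + 1 := by
        rw [h0]; congr 1; exact Finset.sum_congr rfl (fun i _ => h2 i)
    _ = 1 + ∑ k ∈ Finset.range u, gI n (k : Int) := by ring

-- closed recurrence applied t+1 times
lemma sum_g (n : Int) (hn : 0 ≤ n) : ∀ t : Nat,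
    1 + ((t : Int) + 1) + ∑ u ∈ Finset.range (t + 1), (∑ k ∈ Finset.range u, gI n (k : Int))
      = gI n (n + t) := by
  intro t
  induction t with
  | zero =>
    have h := gI_rec n n hn le_rfl
    rw [show (n - n).toNat = 0 from by omega] at h
    simp only [Finset.sum_range_zero, add_zero] at h
    rw [gI_neg n (n - 1) (by omega)] at h
    simp [h]
  | succ u ih =>
    have hrec := gI_rec n (n + (u + 1 : ℕ)) hn (by push_cast; omega)
    rw [show (n + ((u:ℕ) + 1 : ℕ) - 1 : Int) = n + (u : ℕ) from by push_cast; ring] at hrec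
    rw [show (n + ((u:ℕ) + 1 : ℕ) - n : Int).toNat = u + 1 from by push_cast; omega] at hrec
    rw [Finset.sum_range_succ
      (fun u => ∑ k ∈ Finset.range u, gI n (k : Int)) (u + 1)]
    push_cast
    push_cast at ih hrec
    omega

-- A's double sum equals g: 1 + Σ_{s,b} gI (N-s-b-1) = gI N
lemma sum_eq_g (n N : Int) (hn : 0 ≤ n) (hN : n ≤ N) :
    1 + ((PySem.List.pyRange 0 (N - n + 1) 1).map
      (fun s => ((PySem.List.pyRange n (N - s + 1) 1).map
        (fun b => gI n (N - s - b - 1))).sum)).sum = gI n N := by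
  set t : ℕ := (N - n).toNat with ht
  have hNt : N = n + (t : Int) := by omega
  -- outer range
  rw [PySem.List.pyRange_one 0 (N - n + 1)]
  rw [show (N - n + 1 - 0).toNat = t + 1 from by omega]
  rw [List.map_map, sum_map_range]
  -- rewrite each inner sum
  have hinner : ∀ s ∈ Finset.range (t + 1),
      ((fun s => ((PySem.List.pyRange n (N - s + 1) 1).map
        (fun b => gI n (N - s - b - 1))).sum) ∘ fun k : ℕ => 0 + (k : Int)) s
      = 1 + ∑ k ∈ Finset.range (t - s), gI n (k : Int) := by
    intro s hs
    rw [Finset.mem_range] at hs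
    simp only [Function.comp, zero_add]
    rw [PySem.List.pyRange_one n (N - s + 1)]
    rw [show (N - (s:Int) + 1 - n).toNat = (t - s) + 1 from by omega]
    rw [List.map_map, sum_map_range]
    have harg : ∀ j ∈ Finset.range ((t - s) + 1),
        ((fun b => gI n (N - s - b - 1)) ∘ fun k : ℕ => n + (k : Int)) j
          = gI n (((t - s : ℕ) : Int) - j - 1) := by
      intro j hj
      simp only [Function.comp]
      congr 1
      omega
    rw [Finset.sum_congr rfl harg]
    exact inner_row n hn (t - s)
  rw [Finset.sum_congr rfl hinner]
  -- split the constant 1's and reflect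
  rw [Finset.sum_add_distrib]
  rw [Finset.sum_const, Finset.card_range]
  have hrefl : ∑ s ∈ Finset.range (t + 1), (∑ k ∈ Finset.range (t - s), gI n (k : Int))
      = ∑ u ∈ Finset.range (t + 1), (∑ k ∈ Finset.range u, gI n (k : Int)) := by
    have := Finset.sum_range_reflect
      (fun u : ℕ => ∑ k ∈ Finset.range u, gI n (k : Int)) (t + 1)
    rw [← this]
    simp only [Nat.add_sub_cancel]
  rw [hrefl]
  have := sum_g n hn t
  rw [hNt]
  simp only [nsmul_eq_mul, mul_one] at *
  push_cast at this ⊢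
  omega

-- the memo dict only ever holds correct values
def CacheOK (n : Int) (c : PySem.Dict Int Int) : Prop :=
  ∀ k v, c.get? k = some v → v = gI n k

lemma cacheOK_empty (n : Int) : CacheOK n PySem.Dict.empty := by
  intro k v h
  simp [PySem.Dict.get?_empty] at h

-- memoized F computes gI, and preserves cache correctness
lemma euler115F_spec : ∀ (fuel : Nat) (n N : Int) (c : PySem.Dict Int Int),
    0 ≤ n → (N + 2).toNat ≤ fuel → CacheOK n c →
    (euler115F fuel n N c).1 = gI n N ∧ CacheOK n (euler115F fuel n N c).2 := by
  intro fuel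
  induction fuel with
  | zero =>
    intro n N c hn hf hc
    simp only [euler115F]
    exact ⟨(gI_neg n N (by omega)).symm, hc⟩
  | succ f IH =>
    intro n N c hn hf hc
    by_cases hgt : n > N
    · simp only [euler115F, if_pos hgt]
      exact ⟨(gI_neg n N hgt).symm, hc⟩
    · have hnN : n ≤ N := by omega
      have hfN : (N + 1).toNat ≤ f := by omega
      -- inner loop invariant
      have inner : ∀ (s : Int), 0 ≤ s → ∀ (bs : List Int), (∀ b ∈ bs, n ≤ b) →
          ∀ (a : Int) (c' : PySem.Dict Int Int), CacheOK n c' →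
          (bs.foldl
            (fun acc2 b =>
              (acc2.1 + (euler115F f n (N - s - b - 1) acc2.2).1,
               (euler115F f n (N - s - b - 1) acc2.2).2)) (a, c')).1
            = a + (bs.map (fun b => gI n (N - s - b - 1))).sum ∧
          CacheOK n ((bs.foldl
            (fun acc2 b =>
              (acc2.1 + (euler115F f n (N - s - b - 1) acc2.2).1,
               (euler115F f n (N - s - b - 1) acc2.2).2)) (a, c')).2) := by
        intro s hs bs
        induction bs with
        | nil => intro _ a c' hc'; simp [hc']
        | cons b bs ihb =>
          intro hmem a c' hc'
          have hb : n ≤ b := hmem b (List.mem_cons_self)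
          have hcall := IH n (N - s - b - 1) c' hn (by omega) hc'
          simp only [List.foldl_cons]
          have hrest := ihb (fun x hx => hmem x (List.mem_cons_of_mem b hx))
            (a + (euler115F f n (N - s - b - 1) c').1)
            ((euler115F f n (N - s - b - 1) c').2) hcall.2
          refine ⟨?_, hrest.2⟩
          rw [hrest.1, hcall.1, List.map_cons, List.sum_cons]
          ring
      -- outer loop invariant
      have outer : ∀ (ss : List Int), (∀ s ∈ ss, 0 ≤ s) →
          ∀ (a : Int) (c' : PySem.Dict Int Int), CacheOK n c' →
          (ss.foldl
            (fun acc s =>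
              (PySem.List.pyRange n (N - s + 1) 1).foldl
                (fun acc2 b =>
                  (acc2.1 + (euler115F f n (N - s - b - 1) acc2.2).1,
                   (euler115F f n (N - s - b - 1) acc2.2).2)) acc) (a, c')).1
            = a + (ss.map (fun s => ((PySem.List.pyRange n (N - s + 1) 1).map
                (fun b => gI n (N - s - b - 1))).sum)).sum ∧
          CacheOK n ((ss.foldl
            (fun acc s =>
              (PySem.List.pyRange n (N - s + 1) 1).foldl
                (fun acc2 b =>
                  (acc2.1 + (euler115F f n (N - s - b - 1) acc2.2).1,
                   (euler115F f n (N - s - b - 1) acc2.2).2)) acc) (a, c')).2) := by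
        intro ss
        induction ss with
        | nil => intro _ a c' hc'; simp [hc']
        | cons s ss ihs =>
          intro hmem a c' hc'
          have hs : 0 ≤ s := hmem s (List.mem_cons_self)
          have hbmem : ∀ b ∈ PySem.List.pyRange n (N - s + 1) 1, n ≤ b := by
            intro b hbmem
            rw [PySem.List.mem_pyRange_one] at hbmem
            omega
          have hrow := inner s hs (PySem.List.pyRange n (N - s + 1) 1) hbmem a c' hc'
          simp only [List.foldl_cons]
          -- the inner fold produces a pair; rewrite it as such
          have hpair : ((PySem.List.pyRange n (N - s + 1) 1).foldl
              (fun acc2 b =>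
                (acc2.1 + (euler115F f n (N - s - b - 1) acc2.2).1,
                 (euler115F f n (N - s - b - 1) acc2.2).2)) (a, c'))
              = (a + ((PySem.List.pyRange n (N - s + 1) 1).map
                  (fun b => gI n (N - s - b - 1))).sum,
                 ((PySem.List.pyRange n (N - s + 1) 1).foldl
              (fun acc2 b =>
                (acc2.1 + (euler115F f n (N - s - b - 1) acc2.2).1,
                 (euler115F f n (N - s - b - 1) acc2.2).2)) (a, c')).2) := by
            exact Prod.ext hrow.1 rfl
          rw [hpair]
          have hrest := ihs (fun x hx => hmem x (List.mem_cons_of_mem s hx))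
            (a + ((PySem.List.pyRange n (N - s + 1) 1).map
              (fun b => gI n (N - s - b - 1))).sum)
            (((PySem.List.pyRange n (N - s + 1) 1).foldl
              (fun acc2 b =>
                (acc2.1 + (euler115F f n (N - s - b - 1) acc2.2).1,
                 (euler115F f n (N - s - b - 1) acc2.2).2)) (a, c')).2) hrow.2
          refine ⟨?_, hrest.2⟩
          rw [hrest.1, List.map_cons, List.sum_cons]
          ring
      -- assemble
      have hsmem : ∀ s ∈ PySem.List.pyRange 0 (N - n + 1) 1, 0 ≤ s := by
        intro s hsm
        rw [PySem.List.mem_pyRange_one] at hsm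
        omega
      have hmain := outer (PySem.List.pyRange 0 (N - n + 1) 1) hsmem 1 c hc
      cases hget : c.get? N with
      | some v =>
        simp only [euler115F, if_neg hgt, hget, Option.isSome_some, if_true, Option.getD_some]
        exact ⟨hc N v hget, hc⟩
      | none =>
        simp only [euler115F, if_neg hgt, hget, Option.isSome_none, Bool.false_eq_true,
          if_false]
        refine ⟨?_, ?_⟩
        · rw [hmain.1]
          exact sum_eq_g n N hn hnN
        · intro k v hkv
          rw [PySem.Dict.get?_insert] at hkv
          split at hkv
          · rename_i hk
            have hv := Option.some_inj.mp hkv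
            rw [hk, ← hv, hmain.1]
            exact sum_eq_g n N hn hnN
          · exact hmain.2 k v hkv

-- the first exit index exists
lemma exists_exit (m : Int) (hm : 0 ≤ m) : ∃ k : Nat, 1000000 < gI m (15 + k) := by
  refine ⟨(m + 1000000).toNat, ?_⟩
  apply gI_big m _ hm
  omega

-- the value both loops return: the least N ≥ 15 with gI m N > 10^6
def firstN (m : Int) (hm : 0 ≤ m) : Int := 15 + (Nat.find (exists_exit m hm) : Int)

lemma firstN_ge (m : Int) (hm : 0 ≤ m) : 15 ≤ firstN m hm := by
  unfold firstN; omega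

lemma firstN_le (m : Int) (hm : 0 ≤ m) : firstN m hm ≤ m + 1000015 := by
  have h : Nat.find (exists_exit m hm) ≤ (m + 1000000).toNat := by
    apply Nat.find_le
    apply gI_big m _ hm
    omega
  unfold firstN
  omega

lemma firstN_big (m : Int) (hm : 0 ≤ m) : 1000000 < gI m (firstN m hm) := by
  have h := Nat.find_spec (exists_exit m hm)
  unfold firstN
  exact h

lemma firstN_min (m : Int) (hm : 0 ≤ m) (j : Int) (h15 : 15 ≤ j) (hj : j < firstN m hm) :
    gI m j ≤ 1000000 := by
  have h := Nat.find_min (exists_exit m hm) (m := (j - 15).toNat) (by unfold firstN at hj; omega)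
  have h2 : (15 + ((j - 15).toNat : Int)) = j := by omega
  rw [h2] at h
  omega

-- A's loop returns firstN
lemma loopA_spec (m : Int) (hm : 0 ≤ m) : ∀ (fuel : Nat) (N : Int) (c : PySem.Dict Int Int),
    15 ≤ N → CacheOK m c → N ≤ firstN m hm → m + 1000016 ≤ N + fuel →
    euler115Loop fuel m N c = firstN m hm := by
  intro fuel
  induction fuel with
  | zero =>
    intro N c h15 hc hle hf
    have := firstN_le m hm
    simp only [Nat.cast_zero, add_zero] at hf
    omega
  | succ f IH =>
    intro N c h15 hc hle hf
    simp only [euler115Loop]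
    have hF := euler115F_spec (N + 2).toNat m N c hm (le_refl _) hc
    by_cases hv : (euler115F (N + 2).toNat m N c).1 > 1000000
    · rw [if_pos hv]
      rw [hF.1] at hv
      rcases lt_or_eq_of_le hle with h | h
      · exact absurd hv (by have := firstN_min m hm N h15 h; omega)
      · exact h
    · rw [if_neg hv]
      rw [hF.1] at hv
      have h1 := firstN_big m hm
      have h2 : N ≠ firstN m hm := fun he => by rw [he] at hv; omega
      apply IH (N + 1) _ (by omega) hF.2 (by omega) (by push_cast at hf ⊢; omega)

-- B's loop returns firstN
lemma loopB_spec (m : Int) (hm : 0 ≤ m) : ∀ (fuel : Nat) (i : Int) (fs : List Int) (pre prev : Int),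
    0 ≤ i → i ≤ firstN m hm →
    fs = (List.range i.toNat).map (fun k : ℕ => gI m (k : Int)) →
    pre = ∑ k ∈ Finset.range (i - m).toNat, gI m (k : Int) →
    prev = gI m (i - 1) → m + 1000016 ≤ i + fuel →
    euler115AltLoop fuel m i fs pre prev = firstN m hm := by
  intro fuel
  induction fuel with
  | zero =>
    intro i fs pre prev h0i hile hfs hpre hprev hf
    have := firstN_le m hm
    simp only [Nat.cast_zero, add_zero] at hf
    omega
  | succ f IH =>
    intro i fs pre prev h0i hile hfs hpre hprev hf
    subst hfs; subst hpre; subst hprev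
    simp only [euler115AltLoop]
    have hv : (if i < m then (1:Int)
        else gI m (i - 1) + 1 + ∑ k ∈ Finset.range (i - m).toNat, gI m (k : Int)) = gI m i := by
      by_cases him : i < m
      · rw [if_pos him, gI_neg m i him]
      · rw [if_neg him, gI_rec m i hm (by omega)]
    have hlist : ((List.range i.toNat).map (fun k : ℕ => gI m (k : Int))) ++ [gI m i]
        = (List.range (i.toNat + 1)).map (fun k : ℕ => gI m (k : Int)) := by
      rw [List.range_succ, List.map_append, List.map_cons, List.map_nil,
        Int.toNat_of_nonneg h0i]
    by_cases hexit : 15 ≤ i ∧ 1000000 < (if i < m then (1:Int)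
        else gI m (i - 1) + 1 + ∑ k ∈ Finset.range (i - m).toNat, gI m (k : Int))
    · rw [if_pos hexit]
      obtain ⟨h15, hbig⟩ := hexit
      rw [hv] at hbig
      rcases lt_or_eq_of_le hile with h | h
      · exact absurd hbig (by have := firstN_min m hm i h15 h; omega)
      · exact h
    · rw [if_neg hexit]
      have hnext : i + 1 ≤ firstN m hm := by
        by_cases h15 : 15 ≤ i
        · have hnb : ¬ 1000000 < (if i < m then (1:Int)
              else gI m (i - 1) + 1 + ∑ k ∈ Finset.range (i - m).toNat, gI m (k : Int)) := by
            intro hb; exact hexit ⟨h15, hb⟩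
          rw [hv] at hnb
          have h1 := firstN_big m hm
          have h2 : i ≠ firstN m hm := fun he => by rw [he] at hnb; omega
          omega
        · have := firstN_ge m hm; omega
      apply IH (i + 1) _ _ _ (by omega) hnext ?_ ?_ ?_ (by push_cast at hf ⊢; omega)
      · -- fs invariant
        rw [hv, show (i + 1).toNat = i.toNat + 1 from by omega]
        exact hlist
      · -- prefix invariant
        by_cases him : m ≤ i
        · rw [if_pos him, hv, hlist]
          rw [PySem.List.pyGetD_eq_getElem
            (xs := (List.range (i.toNat + 1)).map (fun k : ℕ => gI m (k : Int)))
            (i := i - m) (d := 0) (by omega)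
            (by simp only [List.length_map, List.length_range]; omega)]
          simp only [List.getElem_map, List.getElem_range]
          rw [show (i + 1 - m).toNat = (i - m).toNat + 1 from by omega]
          rw [Finset.sum_range_succ]
        · rw [if_neg him]
          rw [show (i + 1 - m).toNat = (i - m).toNat from by omega]
      · -- prev invariant
        rw [hv]
        congr 1
        omega

-- ===== VERDICT (by name: the statement is the Claim_ definition above) =====
theorem euler115_spec : Claim_equal_euler115 := by
  intro m _ hm
  replace hm : 0 ≤ m := hm
  unfold Spec_euler115 euler115 euler115_alt
  rw [loopA_spec m hm _ 15 _ (by omega) (cacheOK_empty m) (firstN_ge m hm) (by omega)]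
  rw [loopB_spec m hm _ 0 [] 0 1 (by omega) (by have := firstN_ge m hm; omega) (by simp)
    (by rw [show ((0:Int) - m).toNat = 0 from by omega]; simp)
    (by rw [show ((0:Int) - 1) = -1 by norm_num, gI_neg m (-1) (by omega)]) (by omega)]
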